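-- pv_equiv track=rewrite | github.com/CiscoDevNet/telemetry-experiments | modules/mdt/utils.py | ft_dissect
-- ===== SOURCE A (Python) =====
-- from collections import deque
--
-- def ft_dissect(ft_string):
--     """given feature name string or column name, try dissect it into module, encoding path, key value array, leafname"""
--     subs = deque(ft_string.strip().split(':'))
--     leaf = subs.pop()
--     if '[' in ft_string:
--         # the onbox dataset case
--         sp = ft_string.split('[')[0]
--         kv = ft_string[ft_string.find("[")+1:ft_string.find("]")].split(':')
--         leaf = ft_string.split(']')[-1].split('/')[-1]
--         ymd = sp.split(":")[0]
--         sp = sp.split(":")[-1]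
--     else:
--         while True:
--             try:
--                 ymd = subs.popleft()
--             except IndexError:  # queue empty
--                 ymd = ''
--                 break
--             if "Cisco" in ymd:
--                 break
--         sp = subs.popleft() if len(subs) > 0 else ''
--         kv = list(subs)
--     return ymd, sp, kv, leaf.split('/')[-1]
-- ===== SOURCE B (Python) =====
-- def ft_dissect(ft_string):
--     """given feature name string or column name, try dissect it into module, encoding path, key value array, leafname"""
--     if '[' in ft_string:
--         # the onbox dataset case (same as the original)
--         sp = ft_string.split('[')[0]
--         kv = ft_string[ft_string.find("[")+1:ft_string.find("]")].split(':')
--         leaf = ft_string.split(']')[-1].split('/')[-1]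
--         ymd = sp.split(":")[0]
--         sp = sp.split(":")[-1]
--         return ymd, sp, kv, leaf.split('/')[-1]
--     parts = ft_string.strip().split(':')
--     leaf = parts[-1]
--     body = parts[:-1]
--     idx = next((i for i, p in enumerate(body) if 'Cisco' in p), None)
--     if idx is None:
--         ymd, sp, kv = '', '', []
--     else:
--         tail = body[idx:]
--         ymd = tail[0]
--         sp = tail[1] if len(tail) > 1 else ''
--         kv = tail[2:]
--     return ymd, sp, kv, leaf.split('/')[-1]
-- ===== Notes on version B (the rewrite author's own statement) =====
-- stated objective: simpler
-- what changed: The destructive deque with its popleft/try-IndexError while-loop is replaced by one index search for the first 'Cisco' part followed by list slicing; the '[' branch is unchanged.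
import Mathlib
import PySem

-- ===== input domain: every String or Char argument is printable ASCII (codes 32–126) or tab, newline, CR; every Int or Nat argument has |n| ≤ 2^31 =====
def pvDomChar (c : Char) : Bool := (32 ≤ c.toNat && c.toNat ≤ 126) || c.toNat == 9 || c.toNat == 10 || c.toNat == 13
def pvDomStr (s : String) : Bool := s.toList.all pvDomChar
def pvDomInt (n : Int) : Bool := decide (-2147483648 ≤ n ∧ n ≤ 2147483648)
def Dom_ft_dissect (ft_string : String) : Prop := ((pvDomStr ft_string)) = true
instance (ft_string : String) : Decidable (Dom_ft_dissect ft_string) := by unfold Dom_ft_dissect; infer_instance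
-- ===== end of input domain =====

-- B replaces A's destructive deque popleft/try-IndexError loop by a single index search plus
-- list slicing (objective: simpler); the '[' branch is unchanged.

-- ===== PORT A =====
-- s.split(sep) for a nonempty literal sep (split? is none only for sep = ""); shared by both ports
def pySplit (s sep : String) : List String := (PySem.Str.split? s sep).getD []

-- the 'while True: ymd = subs.popleft() … if "Cisco" in ymd: break' loop together with the
-- subsequent 'sp = subs.popleft() if len(subs) > 0 else ""; kv = list(subs)'
def ftLoopA : List String → String × String × List String
  | [] => ("", "", [])                       -- IndexError: ymd = '', queue empty ⇒ sp = '', kv = []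
  | y :: rest =>
      if PySem.Str.isIn "Cisco" y then
        match rest with
        | [] => (y, "", [])
        | s :: t => (y, s, t)
      else ftLoopA rest

def ft_dissect (ft_string : String) : String × String × List String × String :=
  let subs := pySplit (PySem.Str.strip ft_string) ":"
  let leaf := subs.getLastD ""               -- leaf = subs.pop(); split(':') is never empty
  let rest := subs.dropLast                  -- the deque after the pop
  if PySem.Str.isIn "[" ft_string then
    let sp := (pySplit ft_string "[").headD ""
    let kv := pySplit
        (PySem.Str.slice ft_string (some (PySem.Str.find ft_string "[" + 1))
                                   (some (PySem.Str.find ft_string "]"))) ":"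
    let leaf2 := ((pySplit ft_string "]").getLastD "")
    let leaf3 := (pySplit leaf2 "/").getLastD ""
    let ymd := (pySplit sp ":").headD ""
    let sp2 := (pySplit sp ":").getLastD ""
    (ymd, sp2, kv, (pySplit leaf3 "/").getLastD "")
  else
    match ftLoopA rest with
    | (ymd, sp, kv) => (ymd, sp, kv, (pySplit leaf "/").getLastD "")

-- ===== PORT B =====
def ft_dissect_alt (ft_string : String) : String × String × List String × String :=
  if PySem.Str.isIn "[" ft_string then
    let sp := (pySplit ft_string "[").headD ""
    let kv := pySplit
        (PySem.Str.slice ft_string (some (PySem.Str.find ft_string "[" + 1))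
                                   (some (PySem.Str.find ft_string "]"))) ":"
    let leaf2 := ((pySplit ft_string "]").getLastD "")
    let leaf3 := (pySplit leaf2 "/").getLastD ""
    let ymd := (pySplit sp ":").headD ""
    let sp2 := (pySplit sp ":").getLastD ""
    (ymd, sp2, kv, (pySplit leaf3 "/").getLastD "")
  else
    let parts := pySplit (PySem.Str.strip ft_string) ":"
    let leaf := parts.getLastD ""            -- parts[-1]; split(':') is never empty
    let body := parts.dropLast               -- parts[:-1]
    let r :=
      match body.findIdx? (fun p => PySem.Str.isIn "Cisco" p) with
      | none => ("", "", ([] : List String))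
      | some i =>
          let tail := body.drop i            -- body[idx:]
          (tail.headD "",                    -- tail[0]; tail is nonempty here
           if tail.length > 1 then tail.getD 1 "" else "",
           tail.drop 2)                      -- tail[2:]
    (r.1, r.2.1, r.2.2, (pySplit leaf "/").getLastD "")

-- ===== PRECONDITION & SPEC =====
def Spec_ft_dissect (ft_string : String) (out : String × String × List String × String) : Prop := out = ft_dissect_alt ft_string
instance (ft_string : String) (out : String × String × List String × String) : Decidable (Spec_ft_dissect ft_string out) := by unfold Spec_ft_dissect; infer_instance

-- ===== CLAIM (what is proved, stated in full; the proofs are below) =====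
def Claim_equal_ft_dissect : Prop := ∀ (ft_string : String), Dom_ft_dissect ft_string → Spec_ft_dissect ft_string (ft_dissect ft_string)

-- ===== LEMMAS AND PROOFS =====

-- the deque loop computes exactly the find-first-index-then-slice value
theorem ftLoopA_eq_find (l : List String) :
    ftLoopA l =
      match l.findIdx? (fun p => PySem.Str.isIn "Cisco" p) with
      | none => ("", "", ([] : List String))
      | some i =>
          let tail := l.drop i
          (tail.headD "",
           if tail.length > 1 then tail.getD 1 "" else "",
           tail.drop 2) := by
  induction l with
  | nil => rfl
  | cons y rest ih =>
    simp only [ftLoopA, List.findIdx?_cons]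
    by_cases h : PySem.Str.isIn "Cisco" y
    · simp only [h, if_true]
      cases rest with
      | nil => rfl
      | cons s t => simp
    · simp only [h, ih]
      cases hf : rest.findIdx? (fun p => PySem.Str.isIn "Cisco" p) with
      | none => simp
      | some i => simp

-- ===== VERDICT (by name: the statement is the Claim_ definition above) =====
theorem ft_dissect_spec : Claim_equal_ft_dissect := by
  intro s _
  unfold Spec_ft_dissect ft_dissect ft_dissect_alt
  by_cases h : PySem.Str.isIn "[" s = true
  · rw [if_pos h, if_pos h]
  · rw [if_neg h, if_neg h]
    simp only [ftLoopA_eq_find]
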